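-- pv_equiv track=rewrite | github.com/IjonTichy/TichyBot | src/functions/maxspaces.py | maxSpaces
-- ===== SOURCE A (Python) =====
-- def maxSpaces(line, spaceMax=5):
--     spaces = 0
--     ret = []
--
--     for char in line:
--         if char == " ":
--             if spaces >= spaceMax:
--                 continue
--             else:
--                 spaces += 1
--         else:
--             spaces = 0
--         ret.append(char)
--
--     return "".join(ret)
-- ===== SOURCE B (Python) =====
-- def maxSpaces(line, spaceMax=5):
--     # Run-based two-pointer scan: walk maximal runs of equal characters;
--     # truncate space runs to spaceMax, copy other runs verbatim.
--     out = []
--     i = 0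
--     n = len(line)
--     while i < n:
--         j = i
--         while j < n and line[j] == line[i]:
--             j += 1
--         if line[i] == " ":
--             out.append(" " * min(j - i, spaceMax))
--         else:
--             out.append(line[i:j])
--         i = j
--     return "".join(out)
-- ===== Notes on version B (the rewrite author's own statement) =====
-- stated objective: alternative
-- what changed: Replaced the per-character state machine (a running space counter reset on non-spaces) by a run-based two-pointer scan over maximal runs of equal characters, emitting min(run length, spaceMax) spaces for space runs and copying other runs verbatim.
import Mathlib
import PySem

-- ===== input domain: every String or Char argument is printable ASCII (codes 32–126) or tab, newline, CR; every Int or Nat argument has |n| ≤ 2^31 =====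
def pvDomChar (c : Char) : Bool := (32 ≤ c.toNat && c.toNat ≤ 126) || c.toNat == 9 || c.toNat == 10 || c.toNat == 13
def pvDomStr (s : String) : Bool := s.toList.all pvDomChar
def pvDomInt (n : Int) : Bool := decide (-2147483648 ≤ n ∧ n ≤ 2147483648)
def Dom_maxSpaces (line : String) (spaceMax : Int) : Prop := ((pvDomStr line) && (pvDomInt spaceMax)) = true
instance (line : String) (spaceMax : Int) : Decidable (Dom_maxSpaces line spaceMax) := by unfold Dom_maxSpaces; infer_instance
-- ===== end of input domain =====

-- B replaces A's per-character space-counter state machine by a run-based scan over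
-- maximal runs of equal characters (objective: alternative decomposition, same cost).

-- ===== PORT A =====
-- A: per-character loop with a running space counter (reset on non-space), appending kept chars.
def maxSpacesStep (spaceMax : Int) (st : Int × List Char) (c : Char) : Int × List Char :=
  if c = ' ' then
    if st.1 ≥ spaceMax then st
    else (st.1 + 1, st.2 ++ [c])
  else (0, st.2 ++ [c])

def maxSpaces (line : String) (spaceMax : Int) : String :=
  String.mk (line.toList.foldl (maxSpacesStep spaceMax) (0, [])).2

-- ===== PORT B =====
-- B: consume one maximal run of equal characters at a time; a space run of length k
-- contributes (min k spaceMax).toNat spaces (Python's ' ' * min(k, spaceMax)); other runs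
-- are copied verbatim.
def maxSpacesRuns (spaceMax : Int) : List Char → List Char
  | [] => []
  | c :: cs =>
    let run := cs.takeWhile (· == c)
    let rest := cs.dropWhile (· == c)
    (if c = ' ' then List.replicate (min ((run.length : Int) + 1) spaceMax).toNat ' '
     else c :: run) ++ maxSpacesRuns spaceMax rest
termination_by l => l.length
decreasing_by
  exact Nat.lt_succ_of_le (List.length_dropWhile_le _ _)

def maxSpaces_alt (line : String) (spaceMax : Int) : String :=
  String.mk (maxSpacesRuns spaceMax line.toList)

-- ===== PRECONDITION & SPEC =====
def Spec_maxSpaces (line : String) (spaceMax : Int) (out : String) : Prop := out = maxSpaces_alt line spaceMax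
instance (line : String) (spaceMax : Int) (out : String) : Decidable (Spec_maxSpaces line spaceMax out) := by unfold Spec_maxSpaces; infer_instance

-- ===== CLAIM (what is proved, stated in full; the proofs are below) =====
def Claim_equal_maxSpaces : Prop := ∀ (line : String) (spaceMax : Int), Dom_maxSpaces line spaceMax → Spec_maxSpaces line spaceMax (maxSpaces line spaceMax)

-- ===== LEMMAS AND PROOFS =====

-- A's fold threads the output accumulator purely by appending: pull the accumulator out.
theorem stepA_acc (m : Int) (l : List Char) : ∀ (s : Int) (acc : List Char),
    l.foldl (maxSpacesStep m) (s, acc)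
      = ((l.foldl (maxSpacesStep m) (s, [])).1, acc ++ (l.foldl (maxSpacesStep m) (s, [])).2) := by
  induction l with
  | nil => intro s acc; simp
  | cons c t ih =>
    intro s acc
    have key : ∀ a : List Char, maxSpacesStep m (s, a) c
        = ((maxSpacesStep m (s, ([] : List Char)) c).1, a ++ (maxSpacesStep m (s, ([] : List Char)) c).2) := by
      intro a
      unfold maxSpacesStep
      split_ifs <;> simp
    simp only [List.foldl_cons]
    rw [key acc]
    generalize he : maxSpacesStep m (s, ([] : List Char)) c = sd
    obtain ⟨s', d⟩ := sd
    rw [ih s' (acc ++ d), ih s' d]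
    simp

-- A on a run of k spaces starting with counter s (0 ≤ s): it keeps (min k (m-s)).toNat
-- spaces and the counter advances by that amount.
theorem stepA_spaces (m : Int) : ∀ (k : ℕ) (s : Int), 0 ≤ s →
    (List.replicate k ' ').foldl (maxSpacesStep m) (s, [])
      = (s + ((min (k : Int) (m - s)).toNat : Int), List.replicate (min (k : Int) (m - s)).toNat ' ') := by
  intro k
  induction k with
  | zero =>
    intro s hs
    simp
  | succ k ih =>
    intro s hs
    rw [List.replicate_succ, List.foldl_cons]
    by_cases h : s ≥ m
    · have hstep : maxSpacesStep m (s, []) ' ' = (s, []) := by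
        unfold maxSpacesStep; simp [h]
      rw [hstep, ih s hs]
      have h1 : (min ((k : Int)) (m - s)).toNat = 0 := by omega
      have h2 : (min ((k : Int) + 1) (m - s)).toNat = 0 := by omega
      simp [h1, h2]
    · have hstep : maxSpacesStep m (s, []) ' ' = (s + 1, [' ']) := by
        unfold maxSpacesStep; simp [h]
      rw [hstep, stepA_acc, ih (s + 1) (by omega)]
      have h3 : (min (((k + 1 : ℕ)) : Int) (m - s)).toNat = (min ((k : Int)) (m - (s + 1))).toNat + 1 := by
        push_cast; omega
      rw [h3]
      simp [List.replicate_succ]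
      omega

-- A on a run of non-space characters: all kept, counter resets to 0 (run nonempty).
theorem stepA_nonspace (m : Int) (l : List Char) (hl : ∀ c ∈ l, c ≠ ' ') (hne : l ≠ []) :
    ∀ s : Int, l.foldl (maxSpacesStep m) (s, []) = (0, l) := by
  induction l with
  | nil => exact absurd rfl hne
  | cons c t ih =>
    intro s
    have hc : c ≠ ' ' := hl c (by simp)
    have hstep : maxSpacesStep m (s, []) c = (0, [c]) := by
      unfold maxSpacesStep; simp [hc]
    rw [List.foldl_cons, hstep]
    by_cases ht : t = []
    · subst ht; simp
    · rw [stepA_acc, ih (fun x hx => hl x (by simp [hx])) ht 0]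
      simp

-- Main invariant: A's fold from counter s computes B's run recursion, provided the
-- counter is 0 whenever the list starts with a space.
theorem main_inv (m : Int) : ∀ (n : ℕ) (l : List Char), l.length ≤ n → ∀ s : Int, 0 ≤ s →
    (l.head? = some ' ' → s = 0) →
    (l.foldl (maxSpacesStep m) (s, [])).2 = maxSpacesRuns m l := by
  intro n
  induction n with
  | zero =>
    intro l hl s _ _
    have : l = [] := List.eq_nil_of_length_eq_zero (Nat.le_zero.mp hl)
    subst this
    simp [maxSpacesRuns]
  | succ n ih =>
    intro l hl s hs hhead
    cases l with
    | nil => simp [maxSpacesRuns]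
    | cons c cs =>
      have hsplit : c :: cs = (c :: cs.takeWhile (· == c)) ++ cs.dropWhile (· == c) := by
        simp [List.takeWhile_append_dropWhile]
      have hrestlen : (cs.dropWhile (· == c)).length ≤ n :=
        le_trans (List.length_dropWhile_le _ _) (Nat.le_of_succ_le_succ hl)
      have hresthead : (cs.dropWhile (· == c)).head? = some ' ' → c ≠ ' ' := by
        intro hh
        have := List.head?_dropWhile_not (· == c) cs
        rw [hh] at this
        simp at this
        intro hc; subst hc; exact this rfl
      by_cases hc : c = ' '
      · subst hc
        have hs0 : s = 0 := hhead rfl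
        subst hs0
        have hrep : ' ' :: cs.takeWhile (· == ' ')
            = List.replicate ((cs.takeWhile (· == ' ')).length + 1) ' ' := by
          rw [List.replicate_succ]
          congr 1
          exact List.eq_replicate_of_mem (fun b hb => by
            have := List.mem_takeWhile_imp hb; simpa using this)
        conv_lhs => rw [hsplit]
        rw [List.foldl_append, hrep, stepA_spaces m _ 0 le_rfl]
        set k : ℕ := (cs.takeWhile (· == ' ')).length with hk
        set a : ℕ := (min ((k : Int) + 1) m).toNat with ha
        have hmin : (min ((k + 1 : ℕ) : Int) (m - 0)).toNat = a := by
          push_cast; omega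
        rw [hmin]
        rw [stepA_acc]
        have hrec := ih (cs.dropWhile (· == ' ')) hrestlen (0 + (a : Int)) (by omega)
          (fun hh => absurd rfl (hresthead hh))
        simp only [maxSpacesRuns]
        simp [ha, hk]
        have hstate : (0 : Int) + (a : Int) = max (min ((k : Int) + 1) m) 0 := by
          rw [ha, Int.toNat_eq_max]; omega
        rw [hstate] at hrec
        simpa [hk] using hrec
      · have hnonempty : (c :: cs.takeWhile (· == c)) ≠ [] := by simp
        have hnospace : ∀ x ∈ (c :: cs.takeWhile (· == c)), x ≠ ' ' := by
          intro x hx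
          rcases List.mem_cons.mp hx with h | h
          · subst h; exact hc
          · have := List.mem_takeWhile_imp h
            simp at this; subst this; exact hc
        conv_lhs => rw [hsplit]
        rw [List.foldl_append, stepA_nonspace m _ hnospace hnonempty s, stepA_acc]
        have hrec := ih (cs.dropWhile (· == c)) hrestlen 0 le_rfl (fun _ => rfl)
        simp only [maxSpacesRuns]
        simp [hrec, hc]

-- ===== VERDICT (by name: the statement is the Claim_ definition above) =====
theorem maxSpaces_spec : Claim_equal_maxSpaces := by
  intro line spaceMax _
  unfold Spec_maxSpaces maxSpaces maxSpaces_alt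
  congr 1
  exact main_inv spaceMax line.toList.length line.toList le_rfl 0 le_rfl (fun _ => rfl)
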